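-- pv_equiv track=rewrite | github.com/AlexanderGetman/yahtzee-python | pyahtzee/combinations.py | one_pair
-- ===== SOURCE A (Python) =====
-- def one_pair(my_list):
--     duplicates = []
--     max_number = 0
--     for num in my_list:
--         if my_list.count(num) > 1 and num not in duplicates:
--             duplicates.append(num)
--     if duplicates:
--         for num in duplicates:
--             if num > max_number:
--                 max_number = num
--     return max_number * 2
-- ===== SOURCE B (Python) =====
-- def one_pair(my_list):
--     s = sorted(my_list)
--     best = 0
--     for a, b in zip(s, s[1:]):
--         if a == b:
--             best = a
--     return max(best, 0) * 2
-- ===== Notes on version B (the rewrite author's own statement) =====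
-- stated objective: faster
-- what changed: Instead of collecting duplicates via quadratic count scans and then maximising, B sorts a copy of the list and makes one adjacent-pair scan: sortedness makes the last equal neighbour pair the largest duplicated value.
import Mathlib
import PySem

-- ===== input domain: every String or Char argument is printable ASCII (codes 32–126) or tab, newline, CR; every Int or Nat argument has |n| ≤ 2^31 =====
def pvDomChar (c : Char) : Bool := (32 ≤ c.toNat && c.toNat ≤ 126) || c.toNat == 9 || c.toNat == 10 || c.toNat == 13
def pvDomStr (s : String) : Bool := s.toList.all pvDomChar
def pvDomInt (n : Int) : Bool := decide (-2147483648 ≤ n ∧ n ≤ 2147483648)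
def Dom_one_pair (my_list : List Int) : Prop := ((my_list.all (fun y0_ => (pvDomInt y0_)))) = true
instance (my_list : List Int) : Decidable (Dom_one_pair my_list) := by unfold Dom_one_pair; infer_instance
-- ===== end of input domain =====

-- B sorts a copy and scans adjacent pairs once instead of A's count-inside-loop duplicate collection; proved equal on all inputs.


-- ===== PORT A =====
def one_pair (my_list : List Int) : Int :=
  let duplicates : List Int :=
    my_list.foldl (fun ds num =>
      if PySem.List.count my_list num > 1 ∧ num ∉ ds then ds ++ [num] else ds) []
  let max_number : Int :=
    if duplicates ≠ [] then
      duplicates.foldl (fun m num => if num > m then num else m) 0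
    else 0
  max_number * 2

-- ===== PORT B =====
def one_pair_alt (my_list : List Int) : Int :=
  let s : List Int := PySem.List.sorted my_list (fun x => x) false
  let best : Int :=
    (s.zip (PySem.List.slice s (some 1) none)).foldl
      (fun best ab => if ab.1 = ab.2 then ab.1 else best) 0
  max best 0 * 2

-- ===== PRECONDITION & SPEC =====
def Spec_one_pair (my_list : List Int) (out : Int) : Prop := out = one_pair_alt my_list
instance (my_list : List Int) (out : Int) : Decidable (Spec_one_pair my_list out) := by unfold Spec_one_pair; infer_instance

-- ===== CLAIM (what is proved, stated in full; the proofs are below) =====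
def Claim_equal_one_pair : Prop := ∀ (my_list : List Int), Dom_one_pair my_list → Spec_one_pair my_list (one_pair my_list)

-- ===== LEMMAS AND PROOFS =====

-- The value recorded by B's adjacent-pair scan: the last adjacent equal pair of s, if any.
def lastDup : List Int → Option Int
  | a :: b :: t =>
    match lastDup (b :: t) with
    | some v => some v
    | none => if a = b then some a else none
  | _ => none

-- B's fold over zipped neighbours computes lastDup (with the init as default).
lemma fold_zip_eq_lastDup : ∀ (s : List Int) (init : Int),
    (s.zip s.tail).foldl (fun best ab => if ab.1 = ab.2 then ab.1 else best) init =
      (lastDup s).getD init := by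
  intro s
  induction s with
  | nil => intro init; simp [lastDup]
  | cons a t ih =>
    cases t with
    | nil => intro init; simp [lastDup]
    | cons b u =>
      intro init
      simp only [List.tail_cons, List.zip_cons_cons, List.foldl_cons]
      have h := ih (if a = b then a else init)
      simp only [List.tail_cons] at h
      rw [h]
      simp only [lastDup]
      cases hld : lastDup (b :: u) with
      | some v => simp
      | none => split_ifs <;> simp

-- A's duplicate-collecting fold: membership characterisation.
lemma mem_dupfold (P : Int → Prop) [DecidablePred P] (xs : List Int) :
    ∀ (acc : List Int) (x : Int),
      x ∈ xs.foldl (fun ds num => if P num ∧ num ∉ ds then ds ++ [num] else ds) acc ↔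
        x ∈ acc ∨ (x ∈ xs ∧ P x) := by
  induction xs with
  | nil => simp
  | cons y ys ih =>
    intro acc x
    simp only [List.foldl_cons]
    by_cases hy : P y ∧ y ∉ acc
    · rw [if_pos hy, ih]
      simp only [List.mem_cons]
      constructor
      · rintro (h | h)
        · rcases List.mem_append.mp h with h | h
          · exact Or.inl h
          · have hxy : x = y := by simpa using h
            exact Or.inr ⟨Or.inl hxy, hxy ▸ hy.1⟩
        · exact Or.inr ⟨Or.inr h.1, h.2⟩
      · rintro (h | ⟨h | h, hp⟩)
        · exact Or.inl (List.mem_append.mpr (Or.inl h))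
        · exact Or.inl (List.mem_append.mpr (by simp [h]))
        · exact Or.inr ⟨h, hp⟩
    · rw [if_neg hy, ih]
      constructor
      · rintro (h | h)
        · exact Or.inl h
        · exact Or.inr ⟨List.mem_cons_of_mem _ h.1, h.2⟩
      · rintro (h | ⟨h, hp⟩)
        · exact Or.inl h
        · rcases List.mem_cons.mp h with rfl | h
          · by_cases hmem : x ∈ acc
            · exact Or.inl hmem
            · exact absurd ⟨hp, hmem⟩ hy
          · exact Or.inr ⟨h, hp⟩

-- A's max loop, expressed with `max`.
lemma max_body_eq : (fun (m num : Int) => if num > m then num else m) = max := by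
  funext m n
  simp only [max_def]
  split_ifs <;> omega

-- Upper bound for a max fold.
lemma foldl_max_le (c : Int) : ∀ (L : List Int) (init : Int),
    init ≤ c → (∀ x ∈ L, x ≤ c) → L.foldl max init ≤ c := by
  intro L
  induction L with
  | nil => intro init hi _; simpa using hi
  | cons y ys ih =>
    intro init hi h
    simp only [List.foldl_cons]
    exact ih _ (max_le hi (h y (by simp))) (fun x hx => h x (by simp [hx]))

-- A's max fold over a list with a known member bounding all members.
lemma maxfold_eq (L : List Int) (m : Int) (hm : m ∈ L) (hub : ∀ x ∈ L, x ≤ m) :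
    L.foldl (fun a n => if n > a then n else a) 0 = max 0 m := by
  rw [max_body_eq]
  rcases PySem.List.le_foldl_max L (0 : Int) with ⟨h0, hmem⟩
  have h1 : L.foldl max 0 ≤ max 0 m :=
    foldl_max_le _ L 0 (le_max_left 0 m)
      (fun x hx => le_trans (hub x hx) (le_max_right 0 m))
  exact le_antisymm h1 (max_le h0 (hmem m hm))

-- On a sorted list, lastDup is the largest duplicated value (none iff no duplicates).
lemma lastDup_sorted : ∀ (s : List Int), s.Pairwise (· ≤ ·) →
    (lastDup s = none ∧ ∀ w : Int, ¬ 1 < s.count w) ∨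
    (∃ m, lastDup s = some m ∧ 1 < s.count m ∧ ∀ w : Int, 1 < s.count w → w ≤ m) := by
  intro s
  induction s with
  | nil => intro _; left; simp [lastDup]
  | cons a t ih =>
    intro hs
    cases t with
    | nil =>
      left
      refine ⟨by simp [lastDup], fun w => ?_⟩
      simp [List.count_cons]
      split_ifs <;> omega
    | cons b u =>
      rcases List.pairwise_cons.mp hs with ⟨ha, hs'⟩
      have hb : ∀ x ∈ u, b ≤ x := (List.pairwise_cons.mp hs').1
      rcases ih hs' with ⟨hnone, hnd⟩ | ⟨m, hm, hcm, hub⟩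
      · by_cases hab : a = b
        · right
          refine ⟨a, by simp [lastDup, hnone, hab], ?_, ?_⟩
          · have hmem : 0 < (b :: u).count a := List.count_pos_iff.mpr (by simp [hab])
            rw [List.count_cons_self]; omega
          · intro w hw
            by_cases hwa : w = a
            · exact le_of_eq hwa
            · exfalso
              apply hnd w
              have : (a :: b :: u).count w = (b :: u).count w + if a = w then 1 else 0 := by
                simp [List.count_cons]
              rw [this, if_neg (fun h => hwa h.symm)] at hw
              omega
        · left
          refine ⟨by simp [lastDup, hnone, hab], fun w hw => ?_⟩
          have hcw : (a :: b :: u).count w = (b :: u).count w + if a = w then 1 else 0 := by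
            simp [List.count_cons]
          have hnw := hnd w
          by_cases hwa : w = a
          · -- a would need to appear in b :: u, impossible for a ≠ b with sortedness
            have hnot : a ∉ b :: u := by
              intro hmem
              rcases List.mem_cons.mp hmem with h | h
              · exact hab h
              · exact hab (le_antisymm (ha b (by simp)) (hb a h))
            have : (b :: u).count w = 0 := by
              rw [hwa]; exact List.count_eq_zero.mpr hnot
            rw [hcw, this] at hw
            split_ifs at hw <;> omega
          · rw [hcw, if_neg (fun h => hwa h.symm)] at hw
            omega
      · right
        have hmmem : m ∈ b :: u := List.count_pos_iff.mp (by omega)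
        have hbm : b ≤ m := by
          rcases List.mem_cons.mp hmmem with h | h
          · exact le_of_eq h.symm
          · exact hb m h
        refine ⟨m, by simp [lastDup, hm], ?_, ?_⟩
        · have : (b :: u).count m ≤ (a :: b :: u).count m := by
            simp [List.count_cons]
          omega
        · intro w hw
          by_cases hwa : w = a
          · exact hwa ▸ le_trans (ha b (by simp)) hbm
          · apply hub w
            have : (a :: b :: u).count w = (b :: u).count w + if a = w then 1 else 0 := by
              simp [List.count_cons]
            rw [this, if_neg (fun h => hwa h.symm)] at hw
            omega

-- ===== VERDICT (by name: the statement is the Claim_ definition above) =====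
theorem one_pair_spec : Claim_equal_one_pair := by
  intro xs _
  simp only [Spec_one_pair, one_pair, one_pair_alt]
  rw [PySem.List.slice_from_one, fold_zip_eq_lastDup]
  set s := PySem.List.sorted xs (fun x => x) false with hsdef
  have hperm : s.Perm xs := PySem.List.sorted_perm xs (fun x => x) false
  have hcount : ∀ v : Int, s.count v = xs.count v := fun v => hperm.count_eq v
  have hpair : s.Pairwise (· ≤ ·) := PySem.List.sorted_pairwise xs (fun x => x)
  have hPc : ∀ v : Int, PySem.List.count xs v = xs.count v := by
    intro v; simp [PySem.List.count]
  rcases lastDup_sorted s hpair with ⟨hn, hnd⟩ | ⟨m, hm, hcm, hub⟩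
  · have hDA : xs.foldl (fun ds num =>
        if PySem.List.count xs num > 1 ∧ num ∉ ds then ds ++ [num] else ds) [] = [] := by
      rw [List.eq_nil_iff_forall_not_mem]
      intro x hx
      rcases (mem_dupfold (fun v => PySem.List.count xs v > 1) xs [] x).mp hx with h | ⟨_, hP⟩
      · simp at h
      · exact hnd x (by rw [hcount]; rw [hPc] at hP; omega)
    rw [hDA]
    simp [hn]
  · have hmDA : m ∈ xs.foldl (fun ds num =>
        if PySem.List.count xs num > 1 ∧ num ∉ ds then ds ++ [num] else ds) [] := by
      apply (mem_dupfold (fun v => PySem.List.count xs v > 1) xs [] m).mpr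
      refine Or.inr ⟨?_, ?_⟩
      · exact hperm.mem_iff.mp (List.count_pos_iff.mp (by omega))
      · rw [hPc, ← hcount]; omega
    rw [if_pos (List.ne_nil_of_mem hmDA)]
    have hubDA : ∀ x ∈ xs.foldl (fun ds num =>
        if PySem.List.count xs num > 1 ∧ num ∉ ds then ds ++ [num] else ds) [], x ≤ m := by
      intro x hx
      rcases (mem_dupfold (fun v => PySem.List.count xs v > 1) xs [] x).mp hx with h | ⟨_, hP⟩
      · simp at h
      · exact hub x (by rw [hcount]; rw [hPc] at hP; omega)
    rw [maxfold_eq _ m hmDA hubDA, hm]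
    simp [max_comm]
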